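-- pv_equiv track=rewrite | github.com/ParanoidAndroidMarvin/AoC-2024 | puzzles/disk_fragmenter.py | get_free_space_index
-- ===== SOURCE A (Python) =====
-- EMPTY = '.'
--
-- def get_free_space_index(disk_blocks, size):
--     i = 0
--     while i < len(disk_blocks):
--         if disk_blocks[i] == EMPTY:
--             for j in range(size):
--                 if i + j >= len(disk_blocks):
--                     break
--                 if disk_blocks[i + j] != EMPTY:
--                     i += j
--                     break
--                 if j == size - 1:
--                     return i
--         i += 1
--     return -1
-- ===== SOURCE B (Python) =====
-- EMPTY = '.'
--
-- def get_free_space_index(disk_blocks, size):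
--     run = 0
--     for i, block in enumerate(disk_blocks):
--         if block == EMPTY:
--             run += 1
--             if run == size:
--                 return i + 1 - size
--         else:
--             run = 0
--     return -1
-- ===== Notes on version B (the rewrite author's own statement) =====
-- stated objective: faster
-- what changed: Replaced the restarting while-loop with a nested look-ahead window scan by a single left-to-right pass that counts the current run of consecutive empty blocks and returns as soon as the run length reaches size.
import Mathlib
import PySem

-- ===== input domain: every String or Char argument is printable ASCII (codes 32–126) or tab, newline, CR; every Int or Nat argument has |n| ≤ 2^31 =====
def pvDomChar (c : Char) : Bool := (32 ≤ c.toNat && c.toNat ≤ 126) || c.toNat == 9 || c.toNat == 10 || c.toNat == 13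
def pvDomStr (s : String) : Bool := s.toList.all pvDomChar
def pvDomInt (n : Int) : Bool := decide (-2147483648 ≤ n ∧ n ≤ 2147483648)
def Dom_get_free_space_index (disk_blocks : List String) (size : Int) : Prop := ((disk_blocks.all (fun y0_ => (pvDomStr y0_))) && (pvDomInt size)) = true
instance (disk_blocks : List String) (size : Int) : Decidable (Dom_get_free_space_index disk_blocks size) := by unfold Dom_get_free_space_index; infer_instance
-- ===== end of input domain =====

-- B replaces A's restarting window scan by one linear pass counting the current run of empties (faster in a timing run: asymptotic O(n·size) → O(n)).

-- ===== PORT A =====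
-- inner 'for j in range(size)' loop of A; i is always a valid nonnegative index here
-- (the bounds test 'i + j >= len' precedes the access, so List.getD is exact).
-- fuel = number of remaining loop iterations, size.toNat at entry (fuel 0 = 'range(size)' exhausted);
-- result: Sum.inl r = 'return r'; Sum.inr j = loop left with i advanced by j (then i += 1 in the outer loop).
def pvAInner (db : List String) (size : Int) (i : Nat) : Nat → Nat → Sum Int Nat
  | _, 0 => Sum.inr 0
  | j, fuel + 1 =>
    if (i : Int) + (j : Int) ≥ (db.length : Int) then Sum.inr 0
    else if db.getD (i + j) "" ≠ "." then Sum.inr j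
    else if (j : Int) = size - 1 then Sum.inl (i : Int)
    else pvAInner db size i (j + 1) fuel

-- outer 'while i < len(disk_blocks)' loop of A (i starts at 0 and only grows, so Nat);
-- fuel bounds the number of iterations (each one increases i by at least 1, so db.length at entry suffices)
def pvAOuter (db : List String) (size : Int) : Nat → Nat → Int
  | _, 0 => -1
  | i, fuel + 1 =>
    if i < db.length then
      if db.getD i "" = "." then
        match pvAInner db size i 0 size.toNat with
        | Sum.inl r => r
        | Sum.inr j => pvAOuter db size (i + j + 1) fuel
      else pvAOuter db size (i + 1) fuel
    else -1

def get_free_space_index (disk_blocks : List String) (size : Int) : Int :=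
  pvAOuter disk_blocks size 0 disk_blocks.length

-- ===== PORT B =====
-- B's single 'for i, block in enumerate(disk_blocks)' pass; i is the index of the head of the remaining suffix
def pvBLoop (db : List String) (size : Int) (i run : Nat) : Int :=
  match db with
  | [] => -1
  | b :: rest =>
    if b = "." then
      if (run : Int) + 1 = size then (i : Int) + 1 - size
      else pvBLoop rest size (i + 1) (run + 1)
    else pvBLoop rest size (i + 1) 0

def get_free_space_index_alt (disk_blocks : List String) (size : Int) : Int :=
  pvBLoop disk_blocks size 0 0

-- ===== PRECONDITION & SPEC =====
def Spec_get_free_space_index (disk_blocks : List String) (size : Int) (out : Int) : Prop := out = get_free_space_index_alt disk_blocks size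
instance (disk_blocks : List String) (size : Int) (out : Int) : Decidable (Spec_get_free_space_index disk_blocks size out) := by unfold Spec_get_free_space_index; infer_instance

-- ===== CLAIM (what is proved, stated in full; the proofs are below) =====
def Claim_equal_get_free_space_index : Prop := ∀ (disk_blocks : List String) (size : Int), Dom_get_free_space_index disk_blocks size → Spec_get_free_space_index disk_blocks size (get_free_space_index disk_blocks size)

-- ===== LEMMAS AND PROOFS =====

-- reference: the least p with a full window of '.' of length size starting at p, else -1
def pvWin (db : List String) (size : Int) (p : Nat) : Bool :=
  decide (1 ≤ size) && decide ((p : Int) + size ≤ (db.length : Int)) &&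
    (List.range size.toNat).all (fun j => db.getD (p + j) "" == ".")

def pvRef (db : List String) (size : Int) (p : Nat) : Int :=
  if _ : p < db.length then
    if pvWin db size p then (p : Int) else pvRef db size (p + 1)
  else -1
termination_by db.length - p

theorem pvWin_iff (db : List String) (size : Int) (p : Nat) :
    pvWin db size p = true ↔
      (1 ≤ size ∧ (p : Int) + size ≤ (db.length : Int) ∧
        ∀ j : Nat, (j : Int) < size → db.getD (p + j) "" = ".") := by
  simp only [pvWin, Bool.and_eq_true, decide_eq_true_eq, List.all_eq_true, List.mem_range,
    beq_iff_eq, and_assoc]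
  constructor
  · rintro ⟨h1, h2, h3⟩
    exact ⟨h1, h2, fun j hj => h3 j (by omega)⟩
  · rintro ⟨h1, h2, h3⟩
    exact ⟨h1, h2, fun j hj => h3 j (by omega)⟩

theorem pvRef_ge (db : List String) (size : Int) (p : Nat) (h : db.length ≤ p) :
    pvRef db size p = -1 := by
  rw [pvRef]
  simp [Nat.not_lt.mpr h]

theorem pvRef_win (db : List String) (size : Int) (p : Nat) (hw : pvWin db size p = true) :
    pvRef db size p = (p : Int) := by
  have h := (pvWin_iff db size p).mp hw
  have hp : p < db.length := by omega
  rw [pvRef]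
  simp [hp, hw]

theorem pvRef_skip (db : List String) (size : Int) (p : Nat)
    (hw : pvWin db size p = false) : pvRef db size p = pvRef db size (p + 1) := by
  by_cases hp : p < db.length
  · conv_lhs => rw [pvRef]
    simp [hp, hw]
  · rw [pvRef_ge db size p (by omega), pvRef_ge db size (p+1) (by omega)]

theorem pvRef_skip_range (db : List String) (size : Int) :
    ∀ (n p r : Nat), r + 1 - p ≤ n → p ≤ r + 1 →
      (∀ q : Nat, p ≤ q → q ≤ r → pvWin db size q = false) →
      pvRef db size p = pvRef db size (r + 1) := by
  intro n
  induction n with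
  | zero =>
    intro p r hn hpr _
    have : p = r + 1 := by omega
    rw [this]
  | succ n ih =>
    intro p r hn hpr hno
    by_cases hp : p = r + 1
    · rw [hp]
    · rw [pvRef_skip db size p (hno p le_rfl (by omega))]
      exact ih (p + 1) r (by omega) (by omega) (fun q h1 h2 => hno q (by omega) h2)

theorem pvRef_none (db : List String) (size : Int) :
    ∀ (n p : Nat), db.length - p ≤ n →
      (∀ q : Nat, p ≤ q → pvWin db size q = false) → pvRef db size p = -1 := by
  intro n
  induction n with
  | zero =>
    intro p hn _
    exact pvRef_ge db size p (by omega)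
  | succ n ih =>
    intro p hn hno
    by_cases hp : p < db.length
    · rw [pvRef_skip db size p (hno p le_rfl)]
      exact ih (p + 1) (by omega) (fun q h1 => hno q (by omega))
    · exact pvRef_ge db size p (by omega)

-- characterization of A's inner loop: it returns 'inl i' exactly when the window at i is full,
-- and otherwise an advance j' such that no window starts in [i, i+j'].
theorem pvAInner_spec (db : List String) (size : Int) (i : Nat) :
    ∀ (fuel j : Nat), fuel = (size - (j : Int)).toNat → ((j : Int) < size ∨ j = 0) →
    (∀ k : Nat, k < j → db.getD (i + k) "" = ".") →
    (pvAInner db size i j fuel = Sum.inl (i : Int) ∧ pvWin db size i = true) ∨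
    (∃ j' : Nat, pvAInner db size i j fuel = Sum.inr j' ∧
      ∀ q : Nat, i ≤ q → q ≤ i + j' → pvWin db size q = false) := by
  intro fuel
  induction fuel with
  | zero =>
    intro j hn hj hemp
    rw [pvAInner]
    right
    refine ⟨0, rfl, ?_⟩
    intro q hq1 hq2
    have hj0 : j = 0 := by
      rcases hj with h | h
      · omega
      · exact h
    rw [← Bool.not_eq_true]
    intro hw
    have := (pvWin_iff db size q).mp hw
    omega
  | succ fuel ih =>
    intro j hn hj hemp
    have h1 : (j : Int) < size := by omega
    rw [pvAInner]
    by_cases h2 : (i : Int) + (j : Int) ≥ (db.length : Int)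
    · -- bounds break: window at i does not fit
      right
      refine ⟨0, if_pos h2, ?_⟩
      intro q hq1 hq2
      have hq : q = i := by omega
      subst hq
      rw [← Bool.not_eq_true]
      intro hw
      have := (pvWin_iff db size q).mp hw
      omega
    · rw [if_neg h2]
      by_cases h3 : db.getD (i + j) "" ≠ "."
      · -- non-empty at offset j: every window starting ≤ i+j contains position i+j
        right
        refine ⟨j, if_pos h3, ?_⟩
        intro q hq1 hq2
        rw [← Bool.not_eq_true]
        intro hw
        obtain ⟨hs, hb, hall⟩ := (pvWin_iff db size q).mp hw
        have hk : ((i + j - q : Nat) : Int) < size := by omega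
        have := hall (i + j - q) hk
        rw [show q + (i + j - q) = i + j by omega] at this
        exact h3 this
      · rw [if_neg h3]
        rw [not_not] at h3
        by_cases h4 : (j : Int) = size - 1
        · -- full window found
          left
          refine ⟨if_pos h4, ?_⟩
          rw [pvWin_iff]
          refine ⟨by omega, by omega, ?_⟩
          intro k hk
          by_cases hkj : k < j
          · exact hemp k hkj
          · have hkj' : k = j := by omega
            rw [hkj']; exact h3
        · rw [if_neg h4]
          refine ih (j + 1) (by omega) (by left; omega) ?_
          intro k hk
          by_cases hkj : k < j
          · exact hemp k hkj
          · have hkj' : k = j := by omega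
            rw [hkj']; exact h3

-- A's outer loop computes the reference
theorem pvAOuter_eq_ref (db : List String) (size : Int) :
    ∀ (fuel i : Nat), db.length ≤ fuel + i → pvAOuter db size i fuel = pvRef db size i := by
  intro fuel
  induction fuel with
  | zero =>
    intro i hn
    rw [pvAOuter]
    exact (pvRef_ge db size i (by omega)).symm
  | succ fuel ih =>
    intro i hn
    by_cases hp : i < db.length
    · by_cases hdot : db.getD i "" = "."
      · rcases pvAInner_spec db size i size.toNat 0 (by omega) (Or.inr rfl) (by omega) with
          ⟨hrun, hw⟩ | ⟨j', hrun, hno⟩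
        · rw [pvAOuter, if_pos hp, if_pos hdot, hrun]
          exact (pvRef_win db size i hw).symm
        · rw [pvAOuter, if_pos hp, if_pos hdot, hrun]
          dsimp only
          rw [ih (i + j' + 1) (by omega)]
          exact (pvRef_skip_range db size (i + j' + 1) i (i + j') (by omega) (by omega) hno).symm
      · rw [pvAOuter, if_pos hp, if_neg hdot]
        rw [ih (i + 1) (by omega)]
        refine (pvRef_skip_range db size 1 i i (by omega) (by omega) ?_).symm
        intro q hq1 hq2
        have hq : q = i := by omega
        subst hq
        rw [← Bool.not_eq_true]
        intro hw
        obtain ⟨hs, hb, hall⟩ := (pvWin_iff db size q).mp hw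
        have h0 := hall 0 (by omega)
        rw [Nat.add_zero] at h0
        exact hdot h0
    · rw [pvAOuter, if_neg hp]
      exact (pvRef_ge db size i (by omega)).symm

-- B's loop computes the reference: scanning the suffix db.drop i with a run of 'run'
-- consecutive empties ending at i-1 equals searching for a window from i - run.
theorem pvBLoop_eq_ref (db : List String) (size : Int) :
    ∀ (n i run : Nat), db.length - i ≤ n → run ≤ i →
    (∀ k : Nat, i - run ≤ k → k < i → db.getD k "" = ".") →
    (1 ≤ size → (run : Int) < size) →
    pvBLoop (db.drop i) size i run = pvRef db size (i - run) := by
  intro n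
  induction n with
  | zero =>
    intro i run hn hri hemp hrs
    rw [List.drop_eq_nil_of_le (by omega)]
    rw [pvBLoop]
    refine (pvRef_none db size (db.length - (i - run)) (i - run) (by omega) ?_).symm
    intro q hq
    rw [← Bool.not_eq_true]
    intro hw
    obtain ⟨hs, hb, _⟩ := (pvWin_iff db size q).mp hw
    have := hrs hs
    omega
  | succ n ih =>
    intro i run hn hri hemp hrs
    by_cases hp : i < db.length
    · rw [List.drop_eq_getElem_cons hp]
      by_cases hdot : db[i] = "."
      · by_cases hfull : (run : Int) + 1 = size
        · -- run completed: window at i - run is full and is the first one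
          rw [pvBLoop, if_pos hdot, if_pos hfull]
          have hw : pvWin db size (i - run) = true := by
            rw [pvWin_iff]
            refine ⟨by omega, by omega, ?_⟩
            intro k hk
            by_cases hkr : k < run
            · exact hemp (i - run + k) (by omega) (by omega)
            · have hki : i - run + k = i := by omega
              rw [hki, List.getD_eq_getElem db "" hp]
              exact hdot
          rw [pvRef_win db size (i - run) hw]
          omega
        · rw [pvBLoop, if_pos hdot, if_neg hfull]
          rw [ih (i + 1) (run + 1) (by omega) (by omega)
            (by
              intro k h1 h2
              by_cases hki : k < i
              · exact hemp k (by omega) hki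
              · have hki' : k = i := by omega
                rw [hki', List.getD_eq_getElem db "" hp]
                exact hdot)
            (by intro hs; have := hrs hs; omega)]
          rw [show i + 1 - (run + 1) = i - run by omega]
      · -- run broken at i: no window starts in [i - run, i]
        rw [pvBLoop, if_neg hdot]
        rw [ih (i + 1) 0 (by omega) (by omega) (by omega) (by intro hs; omega)]
        rw [show i + 1 - 0 = i + 1 by omega]
        refine (pvRef_skip_range db size (i + 1) (i - run) i (by omega) (by omega) ?_).symm
        intro q hq1 hq2
        rw [← Bool.not_eq_true]
        intro hw
        obtain ⟨hs, hb, hall⟩ := (pvWin_iff db size q).mp hw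
        have hk : ((i - q : Nat) : Int) < size := by
          have := hrs hs
          omega
        have hq' := hall (i - q) hk
        rw [show q + (i - q) = i by omega, List.getD_eq_getElem db "" hp] at hq'
        exact hdot hq'
    · rw [List.drop_eq_nil_of_le (by omega)]
      rw [pvBLoop]
      refine (pvRef_none db size (db.length - (i - run)) (i - run) (by omega) ?_).symm
      intro q hq
      rw [← Bool.not_eq_true]
      intro hw
      obtain ⟨hs, hb, _⟩ := (pvWin_iff db size q).mp hw
      have := hrs hs
      omega

-- ===== VERDICT (by name: the statement is the Claim_ definition above) =====
theorem get_free_space_index_spec : Claim_equal_get_free_space_index := by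
  intro db size _
  unfold Spec_get_free_space_index get_free_space_index get_free_space_index_alt
  rw [pvAOuter_eq_ref db size db.length 0 (by omega)]
  have h := pvBLoop_eq_ref db size db.length 0 0 (by omega) (by omega) (by omega)
    (by intro hs; omega)
  rw [List.drop_zero] at h
  rw [h]
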